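-- pv_equiv track=rewrite | github.com/MrBrantCode/unitest_baseline | mut_generate/mist_train_taco/taco_10904/solution.py | generate_star_pattern
-- ===== SOURCE A (Python) =====
-- def generate_star_pattern(n: int) -> list[str]:
--     pattern = []
--     for i in range(n):
--         if i % 2 == 0:
--             start = 1
--         else:
--             start = 0
--         row = []
--         for j in range(i + 1):
--             row.append(str(start))
--             start = 1 - start
--         pattern.append(' '.join(row))
--     return pattern
-- ===== SOURCE B (Python) =====
-- def generate_star_pattern(n: int) -> list[str]:
--     if n <= 0:
--         return []
--     even_base = ' '.join('1' if j % 2 == 0 else '0' for j in range(n))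
--     odd_base = ' '.join('0' if j % 2 == 0 else '1' for j in range(n))
--     return [(even_base if i % 2 == 0 else odd_base)[:2 * i + 1] for i in range(n)]
-- ===== Notes on version B (the rewrite author's own statement) =====
-- stated objective: simpler
-- what changed: Replaces A's per-cell inner loop (appending alternating digits one by one with mutable state) by precomputing two full alternating base strings once and taking a prefix slice of the appropriate length for each row.
import Mathlib
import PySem

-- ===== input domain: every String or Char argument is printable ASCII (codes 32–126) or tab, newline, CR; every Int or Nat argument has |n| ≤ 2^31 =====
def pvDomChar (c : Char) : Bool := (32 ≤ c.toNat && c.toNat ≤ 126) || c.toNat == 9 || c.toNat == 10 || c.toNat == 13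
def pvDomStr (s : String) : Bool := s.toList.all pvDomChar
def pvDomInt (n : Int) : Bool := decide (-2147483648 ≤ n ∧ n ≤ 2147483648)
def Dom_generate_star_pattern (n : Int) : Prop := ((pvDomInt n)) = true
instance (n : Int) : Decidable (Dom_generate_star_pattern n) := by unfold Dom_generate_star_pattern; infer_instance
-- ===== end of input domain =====

-- B replaces A's per-cell inner loop by slicing prefixes of two precomputed alternating base strings (objective: simpler).

-- ===== PORT A =====
def generate_star_pattern (n : Int) : List String :=
  (PySem.List.pyRange 0 n 1).foldl
    (fun pattern i =>
      let start : Int := if PySem.Int.mod i 2 = 0 then 1 else 0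
      let rs := (PySem.List.pyRange 0 (i + 1) 1).foldl
        (fun (rs : List String × Int) (_j : Int) => (rs.1 ++ [PySem.Int.toStr rs.2], 1 - rs.2))
        ([], start)
      pattern ++ [PySem.Str.join " " rs.1])
    []

-- ===== PORT B =====
def generate_star_pattern_alt (n : Int) : List String :=
  if n ≤ 0 then []
  else
    let even_base := PySem.Str.join " "
      ((PySem.List.pyRange 0 n 1).map (fun j => if PySem.Int.mod j 2 = 0 then "1" else "0"))
    let odd_base := PySem.Str.join " "
      ((PySem.List.pyRange 0 n 1).map (fun j => if PySem.Int.mod j 2 = 0 then "0" else "1"))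
    (PySem.List.pyRange 0 n 1).map (fun i =>
      PySem.Str.slice (if PySem.Int.mod i 2 = 0 then even_base else odd_base) none (some (2 * i + 1)))

-- ===== PRECONDITION & SPEC =====
def Spec_generate_star_pattern (n : Int) (out : List String) : Prop := out = generate_star_pattern_alt n
instance (n : Int) (out : List String) : Decidable (Spec_generate_star_pattern n out) := by unfold Spec_generate_star_pattern; infer_instance

-- ===== CLAIM (what is proved, stated in full; the proofs are below) =====
def Claim_equal_generate_star_pattern : Prop := ∀ (n : Int), Dom_generate_star_pattern n → Spec_generate_star_pattern n (generate_star_pattern n)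

-- ===== LEMMAS AND PROOFS =====

-- A's inner loop: tokens alternate starting from s, and the final state is s or 1-s by parity.
lemma rowFold (m : Nat) (s : Int) :
    (List.range m).foldl
      (fun (rs : List String × Int) (_ : Nat) => (rs.1 ++ [PySem.Int.toStr rs.2], 1 - rs.2)) ([], s)
    = ((List.range m).map (fun j => PySem.Int.toStr (if j % 2 = 0 then s else 1 - s)),
       if m % 2 = 0 then s else 1 - s) := by
  induction m with
  | zero => simp
  | succ m ih =>
    rw [List.range_succ, List.foldl_append, ih, List.map_append]
    by_cases h : m % 2 = 0
    · have h2 : (m + 1) % 2 ≠ 0 := by omega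
      simp [h, h2]
    · have h2 : (m + 1) % 2 = 0 := by omega
      simp [h, h2]

-- prefix of the interspersed base: the first 2k+1 chars are the first k+1 one-char tokens interspersed
lemma take_join (cs : List Char) (k : Nat) (h : k < cs.length) :
    (PySem.Chars.join [' '] (cs.map (fun c => [c]))).take (2 * k + 1)
    = PySem.Chars.join [' '] ((cs.take (k + 1)).map (fun c => [c])) := by
  induction cs generalizing k with
  | nil => simp at h
  | cons c tail ih =>
    cases tail with
    | nil =>
      have : k = 0 := by simpa using h
      subst this
      simp [PySem.Chars.join_singleton]
    | cons d rest =>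
      cases k with
      | zero =>
        simp [PySem.Chars.join_cons_cons, PySem.Chars.join_singleton, List.take_succ_cons]
      | succ k' =>
        have hk : k' < (d :: rest).length := by simpa using h
        have e1 : (c :: d :: rest).map (fun c => [c]) = [c] :: (d :: rest).map (fun c => [c]) := by simp
        have e2 : ((c :: d :: rest).take (k' + 1 + 1)).map (fun c => [c])
            = [c] :: ((d :: rest).take (k' + 1)).map (fun c => [c]) := by simp
        rw [e1, e2]
        have hc1 : PySem.Chars.join [' '] ([c] :: (d :: rest).map (fun c => [c]))
            = [c] ++ [' '] ++ PySem.Chars.join [' '] ((d :: rest).map (fun c => [c])) := by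
          simp [PySem.Chars.join_cons_cons]
        have hcons : ∃ t ts, (d :: rest).take (k' + 1) = t :: ts := by
          cases rest <;> simp
        obtain ⟨t, ts, ht⟩ := hcons
        have hc2 : PySem.Chars.join [' '] ([c] :: ((d :: rest).take (k' + 1)).map (fun c => [c]))
            = [c] ++ [' '] ++ PySem.Chars.join [' '] (((d :: rest).take (k' + 1)).map (fun c => [c])) := by
          rw [ht]; simp [PySem.Chars.join_cons_cons]
        rw [hc1, hc2]
        have harith : 2 * (k' + 1) + 1 = (2 * k' + 1) + 1 + 1 := by ring
        rw [harith]
        simp only [List.cons_append, List.nil_append, List.take_succ_cons]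
        rw [ih k' hk]
        simp [List.take_succ_cons]


-- 2k+1-char prefix of the one-char-token base equals the first k+1 tokens re-joined
lemma join_slice (m k : Nat) (hk : k < m) (c₀ c₁ : Char) :
    PySem.Str.join " " ((List.range (k+1)).map (fun j => String.ofList [if j % 2 = 0 then c₀ else c₁]))
    = PySem.Str.slice (PySem.Str.join " " ((List.range m).map (fun j => String.ofList [if j % 2 = 0 then c₀ else c₁]))) none (some (2*(k:Int)+1)) := by
  set g : Nat → Char := fun j => if j % 2 = 0 then c₀ else c₁ with hg
  unfold PySem.Str.slice
  rw [PySem.Str.toList_join]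
  simp only [PySem.Chars.slice_eq_listSlice]
  rw [PySem.List.slice_to _ (by omega : (0:Int) ≤ 2*(k:Int)+1)]
  have h1 : ∀ (l : List Nat), (l.map (fun j => String.ofList [g j])).map String.toList = (l.map g).map (fun c => [c]) := by
    intro l; simp [List.map_map, Function.comp]
  have h2 : (2*(k:Int)+1).toNat = 2*k+1 := by omega
  have hsp : (" " : String).toList = [' '] := rfl
  rw [hsp, h1, h2, take_join ((List.range m).map g) k (by simpa using hk)]
  rw [← List.map_take, List.take_range, Nat.min_eq_left (by omega)]
  unfold PySem.Str.join
  congr 1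
  rw [hsp, h1]

theorem generate_star_pattern_spec : Claim_equal_generate_star_pattern := by
  intro n _
  unfold Spec_generate_star_pattern
  unfold generate_star_pattern generate_star_pattern_alt
  by_cases hn : n ≤ 0
  · simp [hn, PySem.List.pyRange_one_eq_nil hn]
  · rw [if_neg (by omega)]
    rw [PySem.List.foldl_append_singleton_eq_map]
    simp only [List.nil_append]
    apply List.map_congr_left
    intro i hi
    rw [PySem.List.mem_pyRange_one] at hi
    obtain ⟨k, rfl⟩ : ∃ k : Nat, i = (k : Int) := ⟨i.toNat, by omega⟩
    show (PySem.Str.join " " ((PySem.List.pyRange 0 ((k:Int) + 1) 1).foldl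
        (fun (rs : List String × Int) (_j : Int) => (rs.1 ++ [PySem.Int.toStr rs.2], 1 - rs.2))
        ([], if PySem.Int.mod (k:Int) 2 = 0 then (1:Int) else 0)).1) = _
    -- inner loop → canonical token list
    rw [PySem.List.pyRange_one 0 ((k:Int)+1)]
    have hkn : ((k:Int) + 1 - 0).toNat = k + 1 := by omega
    rw [hkn, List.foldl_map, rowFold]
    -- the two bases → canonical token lists over range n.toNat
    rw [PySem.List.pyRange_one 0 n, List.map_map, List.map_map]
    have hmn : (n - 0).toNat = n.toNat := by omega
    rw [hmn]
    have hm : ∀ t : Nat, (PySem.Int.mod (t:Int) 2 = 0) ↔ t % 2 = 0 := by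
      intro t; rw [PySem.Int.mod_eq_emod_of_pos (a := (t:Int)) (by omega)]; omega
    have hbase : ∀ (a b : String) (ca cb : Char), a.toList = [ca] → b.toList = [cb] →
        ((fun j => if PySem.Int.mod j 2 = 0 then a else b) ∘ fun t : Nat => 0 + (t:Int))
        = fun t : Nat => String.ofList [if t % 2 = 0 then ca else cb] := by
      intro a b ca cb ha hb
      funext t
      simp only [Function.comp, zero_add, hm t]
      by_cases ht : t % 2 = 0 <;> simp only [ht, if_true, if_false] <;> first | (rw [← ha, String.ofList_toList]) | (rw [← hb, String.ofList_toList])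
    rw [hbase "1" "0" '1' '0' rfl rfl, hbase "0" "1" '0' '1' rfl rfl]
    by_cases hk2 : k % 2 = 0
    · rw [if_pos ((hm k).mpr hk2), if_pos ((hm k).mpr hk2)]
      have ht1 : (fun j : Nat => PySem.Int.toStr (if j % 2 = 0 then (1:Int) else 1 - 1))
          = fun j : Nat => String.ofList [if j % 2 = 0 then '1' else '0'] := by
        funext j; split <;> rfl
      rw [ht1, join_slice n.toNat k (by omega) '1' '0']
    · rw [if_neg (fun hc => hk2 ((hm k).mp hc)), if_neg (fun hc => hk2 ((hm k).mp hc))]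
      have ht0 : (fun j : Nat => PySem.Int.toStr (if j % 2 = 0 then (0:Int) else 1 - 0))
          = fun j : Nat => String.ofList [if j % 2 = 0 then '0' else '1'] := by
        funext j; split <;> rfl
      rw [ht0, join_slice n.toNat k (by omega) '0' '1']
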